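-- pv_equiv track=rewrite | github.com/AlmaPaolaGarciaLanderos/B-squeda-de-grafos-2 | 21110038-APGL-Búsqueda en Profundidad (DFS).py | dfs
-- ===== SOURCE A (Python) =====
-- def dfs(grafo, nodo, visitado=None):
--     """
--     Realiza una búsqueda en profundidad (DFS) en el grafo.
--     :param grafo: Diccionario que representa el grafo.
--     :param nodo: Nodo actual.
--     :param visitado: Conjunto de nodos visitados.
--     :return: Lista de nodos visitados.
--     """
--     if visitado is None:
--         visitado = set()
--
--     visitado.add(nodo)
--     for vecino in grafo[nodo]:
--         if vecino not in visitado: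
--             dfs(grafo, vecino, visitado)
--
--     return list(visitado)
-- ===== SOURCE B (Python) =====
-- def dfs(grafo, nodo, visitado=None):
--     """Iterative DFS with an explicit stack of neighbor iterators (same visit order as the recursion)."""
--     if visitado is None:
--         visitado = set()
--     visitado.add(nodo)
--     stack = [iter(grafo[nodo])]
--     while stack:
--         for vecino in stack[-1]:
--             if vecino not in visitado:
--                 visitado.add(vecino)
--                 stack.append(iter(grafo[vecino]))
--                 break
--         else:
--             stack.pop()
--     return list(visitado)
-- ===== Notes on version B (the rewrite author's own statement) =====
-- stated objective: alternative
-- what changed: The recursive DFS is replaced by an iterative while-loop over an explicit stack of neighbor iterators (visit-time marking), removing recursion while keeping the exact visit order.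
-- outside the precondition, e.g. on dfs({'a': [], 'b': ['c']}, 'a', None): A returns ['a'], B returns ['a']; on dfs({'a': ['b']}, 'a', None): A raises KeyError, B raises KeyError
import Mathlib
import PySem

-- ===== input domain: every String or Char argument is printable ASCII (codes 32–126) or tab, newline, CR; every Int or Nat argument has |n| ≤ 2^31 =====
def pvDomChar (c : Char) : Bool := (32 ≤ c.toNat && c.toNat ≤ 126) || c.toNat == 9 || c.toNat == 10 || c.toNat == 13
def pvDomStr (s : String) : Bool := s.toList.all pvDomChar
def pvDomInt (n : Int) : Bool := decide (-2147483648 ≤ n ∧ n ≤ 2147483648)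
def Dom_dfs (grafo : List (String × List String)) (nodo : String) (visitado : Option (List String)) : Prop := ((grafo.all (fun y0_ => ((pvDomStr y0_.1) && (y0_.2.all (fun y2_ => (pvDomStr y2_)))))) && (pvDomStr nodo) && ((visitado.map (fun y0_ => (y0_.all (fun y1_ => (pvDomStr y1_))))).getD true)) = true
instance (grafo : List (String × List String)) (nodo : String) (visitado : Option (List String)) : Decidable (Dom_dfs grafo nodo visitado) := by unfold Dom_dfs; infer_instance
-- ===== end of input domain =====

-- B rewrites A's recursive DFS as an iterative while-loop over an explicit stack of
-- pending-neighbour lists (objective: alternative decomposition, same visit order).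
-- Both Pythons mutate the caller's `visitado` set in place; the equivalence proved
-- here is about the RETURN value.

-- ===== PORT A =====
-- grafo[nodo]: first-match lookup. Pre_dfs guarantees every looked-up key is present
-- (KeyError excluded), so the [] default is never taken on admitted inputs.
def pvAdj (grafo : List (String × List String)) (nodo : String) : List String :=
  (PySem.Dict.mk grafo).getD nodo []

-- helper lemmas the ports' termination arguments cite by name in decreasing_by
theorem pvAdj_subset (grafo : List (String × List String)) (k : String) :
    ∀ x ∈ pvAdj grafo k, x ∈ grafo.flatMap (·.2) := by
  induction grafo with
  | nil => intro x hx; simp [pvAdj, PySem.Dict.getD_eq_get?_getD, PySem.Dict.get?] at hx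
  | cons p t ih =>
    intro x hx
    rw [pvAdj, PySem.Dict.getD_eq_get?_getD, PySem.Dict.get?_mk_cons] at hx
    by_cases h : p.1 = k
    · simp [h] at hx
      exact List.mem_flatMap.mpr ⟨p, List.mem_cons_self .., hx⟩
    · simp [h] at hx
      have hxt := ih x (by rw [pvAdj, PySem.Dict.getD_eq_get?_getD]; exact hx)
      obtain ⟨q, hq, hxq⟩ := List.mem_flatMap.mp hxt
      exact List.mem_flatMap.mpr ⟨q, List.mem_cons_of_mem _ hq, hxq⟩

theorem pvLex3 {a1 a2 a3 b1 b2 b3 : Nat}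
    (h : a1 < b1 ∨ (a1 = b1 ∧ (a2 < b2 ∨ (a2 = b2 ∧ a3 < b3)))) :
    Prod.Lex (· < ·) (Prod.Lex (· < ·) (· < ·)) (a1, a2, a3) (b1, b2, b3) := by
  rcases h with h | ⟨rfl, h | ⟨rfl, h⟩⟩
  · exact Prod.Lex.left _ _ h
  · exact Prod.Lex.right _ (Prod.Lex.left _ _ h)
  · exact Prod.Lex.right _ (Prod.Lex.right _ h)

-- A's recursion, literally: add `nodo`, then walk grafo[nodo] recursing on unvisited
-- neighbours. `fuel` is a totality guard only (a recursion-depth bound); dfs passes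
-- enough for it never to run out (pvSim / dfs_spec below never reach fuel = 0).
mutual
def dfsVisit (grafo : List (String × List String)) (fuel : Nat) (nodo : String) (vis : PySem.Set String) : PySem.Set String :=
  match fuel with
  | 0 => vis
  | f + 1 => dfsNeighbors grafo f (pvAdj grafo nodo) (PySem.Set.add vis nodo)
termination_by (fuel, 0)

def dfsNeighbors (grafo : List (String × List String)) (fuel : Nat) : List String → PySem.Set String → PySem.Set String
  | [], vis => vis
  | vecino :: rest, vis =>
      if vecino ∈ vis then dfsNeighbors grafo fuel rest vis
      else dfsNeighbors grafo fuel rest (dfsVisit grafo fuel vecino vis)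
termination_by l _ => (fuel, l.length + 1)
end

def dfs (grafo : List (String × List String)) (nodo : String) (visitado : Option (List String)) : List String :=
  let vis : PySem.Set String := match visitado with
    | none => PySem.Set.empty
    | some l => PySem.Set.ofList l
  dfsVisit grafo ((grafo.flatMap (·.2)).length + 1) nodo vis

-- ===== PORT B =====
-- the loop measure: neighbours listed anywhere but not yet visited, then total pending
-- work, then stack height (termination only; not part of the computation)
def pvMeasure (grafo : List (String × List String)) (stack : List (List String)) (vis : PySem.Set String) : Nat × Nat × Nat :=
  (((grafo.flatMap (·.2) ++ stack.flatMap id).toFinset \ vis.toFinset).card,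
   (stack.map List.length).sum, stack.length)

-- B's while-loop: each stack entry holds the remaining elements of one iterator
-- (Python appends the new top at the END of `stack`; here the top is the HEAD —
-- the same stack under a fixed representation).
def dfsLoop (grafo : List (String × List String)) (stack : List (List String)) (vis : PySem.Set String) : PySem.Set String :=
  match stack with
  | [] => vis
  | [] :: stk => dfsLoop grafo stk vis
  | (vecino :: rest) :: stk =>
      if vecino ∈ vis then dfsLoop grafo (rest :: stk) vis
      else dfsLoop grafo (pvAdj grafo vecino :: rest :: stk) (PySem.Set.add vis vecino)
termination_by pvMeasure grafo stack vis
decreasing_by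
  · simp only [pvMeasure, List.flatMap_cons, id_eq, List.nil_append, List.map_cons,
      List.sum_cons, List.length_cons, List.length_nil, Nat.zero_add]
    exact pvLex3 (Or.inr ⟨rfl, Or.inr ⟨rfl, Nat.lt_succ_self _⟩⟩)
  · rename_i hv
    simp only [pvMeasure, List.flatMap_cons, id_eq, List.map_cons, List.sum_cons, List.length_cons]
    apply pvLex3
    refine Or.inr ⟨?_, Or.inl (by omega)⟩
    congr 1
    ext x
    simp only [Finset.mem_sdiff, List.mem_toFinset, List.mem_append, List.mem_cons]
    constructor
    · rintro ⟨hx, hnv⟩; exact ⟨by tauto, hnv⟩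
    · rintro ⟨hx, hnv⟩
      refine ⟨?_, hnv⟩
      rcases hx with h | h | h
      · tauto
      · rcases h with rfl | h
        · exact absurd hv hnv
        · tauto
      · tauto
  · rename_i hv
    simp only [pvMeasure]
    apply pvLex3
    left
    apply Finset.card_lt_card
    constructor
    · intro x hx
      simp only [Finset.mem_sdiff, List.mem_toFinset] at hx ⊢
      obtain ⟨hx, hnv⟩ := hx
      have hnv' : x ∉ vis := fun h => hnv ((PySem.Set.mem_add vis vecino x).mpr (Or.inl h))
      refine ⟨?_, hnv'⟩
      rcases List.mem_append.mp hx with hF | hR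
      · exact List.mem_append.mpr (Or.inl hF)
      · rw [List.flatMap_cons] at hR
        rcases List.mem_append.mp hR with h1 | h2
        · exact List.mem_append.mpr (Or.inl (pvAdj_subset grafo vecino x (by simpa using h1)))
        · refine List.mem_append.mpr (Or.inr ?_)
          rw [List.flatMap_cons] at h2 ⊢
          rcases List.mem_append.mp h2 with h3 | h4
          · refine List.mem_append.mpr (Or.inl ?_)
            simp only [id_eq] at h3 ⊢
            exact List.mem_cons_of_mem _ h3
          · exact List.mem_append.mpr (Or.inr h4)
    · intro hsub
      have hmem : vecino ∈ (grafo.flatMap (·.2) ++ ((vecino :: rest) :: stk).flatMap id).toFinset \ vis.toFinset := by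
        simp only [Finset.mem_sdiff, List.mem_toFinset, List.mem_append, List.flatMap_cons, id_eq, List.mem_cons]
        exact ⟨Or.inr (by simp), hv⟩
      have := hsub hmem
      simp only [Finset.mem_sdiff, List.mem_toFinset] at this
      exact this.2 ((PySem.Set.mem_add vis vecino vecino).mpr (Or.inr rfl))

def dfs_alt (grafo : List (String × List String)) (nodo : String) (visitado : Option (List String)) : List String :=
  let vis : PySem.Set String := match visitado with
    | none => PySem.Set.empty
    | some l => PySem.Set.ofList l
  dfsLoop grafo [pvAdj grafo nodo] (PySem.Set.add vis nodo)

-- ===== PRECONDITION & SPEC =====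
-- Pre_dfs excludes exactly the KeyError risk: the start node and every listed neighbour must be
-- a key of grafo (a neighbour already in the initial visitado set is never looked up, so it is
-- allowed). This is mildly narrower than "A returns": a non-key neighbour that A never reaches
-- (unreachable from nodo, or first seen after being visited) also lets A return; see the cites.
def Pre_dfs (grafo : List (String × List String)) (nodo : String) (visitado : Option (List String)) : Prop :=
  nodo ∈ grafo.map (·.1) ∧
  ∀ p ∈ grafo, ∀ v ∈ p.2, v ∈ grafo.map (·.1) ∨ v ∈ visitado.getD []
instance (grafo : List (String × List String)) (nodo : String) (visitado : Option (List String)) : Decidable (Pre_dfs grafo nodo visitado) := by unfold Pre_dfs; infer_instance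
def pvWitness_dfs : (List (String × List String)) × String × Option (List String) :=
  ([("a", ["b", "a"]), ("b", [])], "a", none)
def Spec_dfs (grafo : List (String × List String)) (nodo : String) (visitado : Option (List String)) (out : List String) : Prop := out = dfs_alt grafo nodo visitado
instance (grafo : List (String × List String)) (nodo : String) (visitado : Option (List String)) (out : List String) : Decidable (Spec_dfs grafo nodo visitado out) := by unfold Spec_dfs; infer_instance

-- ===== CLAIM (what is proved, stated in full; the proofs are below) =====
def Claim_equal_dfs : Prop := ∀ (grafo : List (String × List String)) (nodo : String) (visitado : Option (List String)), Dom_dfs grafo nodo visitado → Pre_dfs grafo nodo visitado → Spec_dfs grafo nodo visitado (dfs grafo nodo visitado)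

-- ===== LEMMAS AND PROOFS =====

-- A's visited set only grows
theorem pvMonoN (grafo : List (String × List String)) :
    ∀ fuel rest (vis : PySem.Set String) (x : String), x ∈ vis → x ∈ dfsNeighbors grafo fuel rest vis := by
  intro fuel
  induction fuel with
  | zero =>
    intro rest
    induction rest with
    | nil => intro vis x hx; rw [dfsNeighbors]; exact hx
    | cons vecino rest ihr =>
      intro vis x hx
      rw [dfsNeighbors]
      split
      · exact ihr vis x hx
      · apply ihr
        rw [dfsVisit]
        exact hx
  | succ f ihf =>
    intro rest
    induction rest with
    | nil => intro vis x hx; rw [dfsNeighbors]; exact hx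
    | cons vecino rest ihr =>
      intro vis x hx
      rw [dfsNeighbors]
      split
      · exact ihr vis x hx
      · apply ihr
        rw [dfsVisit]
        exact ihf _ _ x ((PySem.Set.mem_add vis vecino x).mpr (Or.inl hx))

-- number of listed-but-unvisited neighbours
def pvU (grafo : List (String × List String)) (vis : PySem.Set String) : Nat :=
  ((grafo.flatMap (·.2)).toFinset \ vis.toFinset).card

theorem pvU_mono (grafo : List (String × List String)) {v w : PySem.Set String}
    (h : ∀ x ∈ v, x ∈ w) : pvU grafo w ≤ pvU grafo v := by
  apply Finset.card_le_card
  intro x hx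
  simp only [Finset.mem_sdiff, List.mem_toFinset] at hx ⊢
  exact ⟨hx.1, fun hxv => hx.2 (h x hxv)⟩

theorem pvU_add_lt (grafo : List (String × List String)) {vis : PySem.Set String} {vecino : String}
    (hfl : vecino ∈ grafo.flatMap (·.2)) (hv : vecino ∉ vis) :
    pvU grafo (PySem.Set.add vis vecino) < pvU grafo vis := by
  apply Finset.card_lt_card
  constructor
  · intro x hx
    simp only [Finset.mem_sdiff, List.mem_toFinset] at hx ⊢
    exact ⟨hx.1, fun hxv => hx.2 ((PySem.Set.mem_add vis vecino x).mpr (Or.inl hxv))⟩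
  · intro hsub
    have hmem : vecino ∈ (grafo.flatMap (·.2)).toFinset \ vis.toFinset := by
      simp only [Finset.mem_sdiff, List.mem_toFinset]; exact ⟨hfl, hv⟩
    have := hsub hmem
    simp only [Finset.mem_sdiff, List.mem_toFinset] at this
    exact this.2 ((PySem.Set.mem_add vis vecino vecino).mpr (Or.inr rfl))

theorem pvU_le (grafo : List (String × List String)) (vis : PySem.Set String) :
    pvU grafo vis ≤ (grafo.flatMap (·.2)).length :=
  le_trans (Finset.card_le_card Finset.sdiff_subset) (List.toFinset_card_le _)

theorem pvU_pos (grafo : List (String × List String)) {vis : PySem.Set String} {vecino : String}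
    (hfl : vecino ∈ grafo.flatMap (·.2)) (hv : vecino ∉ vis) : 0 < pvU grafo vis := by
  apply Finset.card_pos.mpr
  exact ⟨vecino, by simp only [Finset.mem_sdiff, List.mem_toFinset]; exact ⟨hfl, hv⟩⟩

-- B's loop runs A's neighbour walk on the top frame, then continues with the rest of the stack
theorem pvSim (grafo : List (String × List String)) :
    ∀ fuel rest stk (vis : PySem.Set String),
      (∀ x ∈ rest, x ∈ grafo.flatMap (·.2)) → pvU grafo vis ≤ fuel →
      dfsLoop grafo (rest :: stk) vis = dfsLoop grafo stk (dfsNeighbors grafo fuel rest vis) := by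
  intro fuel
  induction fuel with
  | zero =>
    intro rest
    induction rest with
    | nil => intro stk vis _ _; rw [dfsLoop, dfsNeighbors]
    | cons vecino rest ihr =>
      intro stk vis hsub hu
      have hvfl : vecino ∈ grafo.flatMap (·.2) := hsub _ (by simp)
      by_cases hv : vecino ∈ vis
      · rw [dfsLoop, if_pos hv, dfsNeighbors, if_pos hv]
        exact ihr stk vis (fun x hx => hsub x (by simp [hx])) hu
      · have := pvU_pos grafo hvfl hv; omega
  | succ f ihf =>
    intro rest
    induction rest with
    | nil => intro stk vis _ _; rw [dfsLoop, dfsNeighbors]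
    | cons vecino rest ihr =>
      intro stk vis hsub hu
      have hvfl : vecino ∈ grafo.flatMap (·.2) := hsub _ (by simp)
      have hrest : ∀ x ∈ rest, x ∈ grafo.flatMap (·.2) := fun x hx => hsub x (by simp [hx])
      by_cases hv : vecino ∈ vis
      · rw [dfsLoop, if_pos hv, dfsNeighbors, if_pos hv]
        exact ihr stk vis hrest hu
      · rw [dfsLoop, if_neg hv, dfsNeighbors, if_neg hv]
        have hlt : pvU grafo (PySem.Set.add vis vecino) < pvU grafo vis := pvU_add_lt grafo hvfl hv
        have e1 := ihf (pvAdj grafo vecino) (rest :: stk) (PySem.Set.add vis vecino)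
          (pvAdj_subset grafo vecino) (by omega)
        rw [e1]
        have hVisit : dfsNeighbors grafo f (pvAdj grafo vecino) (PySem.Set.add vis vecino)
            = dfsVisit grafo (f + 1) vecino vis := by rw [dfsVisit]
        rw [hVisit]
        apply ihr stk (dfsVisit grafo (f + 1) vecino vis) hrest
        have hmono : ∀ x ∈ PySem.Set.add vis vecino, x ∈ dfsVisit grafo (f + 1) vecino vis := by
          intro x hx
          rw [dfsVisit]
          exact pvMonoN grafo f _ _ x hx
        have := pvU_mono grafo hmono
        omega

-- ===== VERDICT (by name: the statement is the Claim_ definition above) =====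
theorem dfs_spec : Claim_equal_dfs := by
  intro grafo nodo visitado _ _
  unfold Spec_dfs dfs dfs_alt
  rw [dfsVisit]
  rw [pvSim grafo ((grafo.flatMap (·.2)).length) (pvAdj grafo nodo) []
      _ (pvAdj_subset grafo nodo) (pvU_le grafo _)]
  rw [dfsLoop]
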